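-- pv_equiv track=rewrite | github.com/avnerelbaz3500/generate-passw | password/maincode/create.py | generate_passphrase
-- ===== SOURCE A (Python) =====
-- def generate_passphrase(phrase):
--     """
--
--     Génère un mot de passe à partir des premiers éléments d'une phrase.
--
--
--     """
--     passphrase = ''
--     word_started = False
--
--     for i, char in enumerate(phrase):
--         if char.isalpha():
--             if not word_started:
--                 passphrase += char
--                 word_started = True
--         elif char == ' ':
--             word_started = False
--         else:
--             word_started = False
--             passphrase += char
--
--     return passphrase
--
--
--     return passphrase
-- ===== SOURCE B (Python) =====
-- from itertools import groupby
--
-- def generate_passphrase(phrase):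
--     out = []
--     for is_alpha, run in groupby(phrase, key=str.isalpha):
--         if is_alpha:
--             out.append(next(run))
--         else:
--             out.extend(c for c in run if c != ' ')
--     return ''.join(out)
-- ===== Notes on version B (the rewrite author's own statement) =====
-- stated objective: idiomatic
-- what changed: Replaces the per-character word_started flag machinery with itertools.groupby run-based processing: take the first char of each alphabetic run and all non-space chars of each non-alphabetic run.
import Mathlib
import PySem

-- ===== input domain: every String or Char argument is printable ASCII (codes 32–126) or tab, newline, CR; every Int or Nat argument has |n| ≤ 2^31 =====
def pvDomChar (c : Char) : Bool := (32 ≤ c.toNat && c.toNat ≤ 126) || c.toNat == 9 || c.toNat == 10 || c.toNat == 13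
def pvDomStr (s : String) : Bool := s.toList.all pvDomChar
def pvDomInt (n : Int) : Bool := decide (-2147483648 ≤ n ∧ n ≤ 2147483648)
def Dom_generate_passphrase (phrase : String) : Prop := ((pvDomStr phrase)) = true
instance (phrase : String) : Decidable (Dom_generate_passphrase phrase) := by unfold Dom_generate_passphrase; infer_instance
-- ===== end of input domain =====

-- B replaces A's per-character word_started flag with run-based (groupby-style) processing; objective: idiomatic.


-- ===== PORT A =====
-- literal port of A: fold over the characters with state (passphrase, word_started)
def generate_passphrase (phrase : String) : String :=
  String.ofList (phrase.toList.foldl (fun (st : List Char × Bool) c =>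
    if PySem.Chars.isalpha c then
      if !st.2 then (st.1 ++ [c], true) else (st.1, true)
    else if c = ' ' then (st.1, false)
    else (st.1 ++ [c], false)) ([], false)).1

-- ===== PORT B =====
-- groupby(phrase, key=str.isalpha): maximal runs of equal isalpha-key, in order
def pvGroups (l : List Char) : List (Bool × List Char) :=
  match l with
  | [] => []
  | c :: rest =>
    let k := PySem.Chars.isalpha c
    (k, c :: rest.takeWhile (fun d => PySem.Chars.isalpha d == k)) ::
      pvGroups (rest.dropWhile (fun d => PySem.Chars.isalpha d == k))
termination_by l.length
decreasing_by
  simp only [List.length_cons]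
  exact Nat.lt_succ_of_le (List.length_dropWhile_le _ _)

-- per group: first char of an alphabetic run, all non-space chars of a non-alphabetic run
def generate_passphrase_alt (phrase : String) : String :=
  String.ofList ((pvGroups phrase.toList).flatMap (fun g =>
    if g.1 then [g.2.headD ' '] else g.2.filter (fun c => c ≠ ' ')))

-- ===== PRECONDITION & SPEC =====
def Spec_generate_passphrase (phrase : String) (out : String) : Prop := out = generate_passphrase_alt phrase
instance (phrase : String) (out : String) : Decidable (Spec_generate_passphrase phrase out) := by unfold Spec_generate_passphrase; infer_instance

-- ===== CLAIM (what is proved, stated in full; the proofs are below) =====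
def Claim_equal_generate_passphrase : Prop := ∀ (phrase : String), Dom_generate_passphrase phrase → Spec_generate_passphrase phrase (generate_passphrase phrase)

-- ===== LEMMAS AND PROOFS =====

-- the list of characters A appends, as a recursion over the input with the flag
def aRun : List Char → Bool → List Char
  | [], _ => []
  | c :: t, started =>
    if PySem.Chars.isalpha c then (if started then aRun t true else c :: aRun t true)
    else if c = ' ' then aRun t false
    else c :: aRun t false

lemma foldA_eq (l : List Char) : ∀ (acc : List Char) (started : Bool),
    (l.foldl (fun (st : List Char × Bool) c =>
      if PySem.Chars.isalpha c then
        if !st.2 then (st.1 ++ [c], true) else (st.1, true)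
      else if c = ' ' then (st.1, false)
      else (st.1 ++ [c], false)) (acc, started)).1 = acc ++ aRun l started := by
  induction l with
  | nil => intro acc started; simp [aRun]
  | cons c t ih =>
    intro acc started
    simp only [Bool.not_eq_true'] at ih ⊢
    simp only [List.foldl_cons]
    by_cases h : PySem.Chars.isalpha c = true
    · cases started <;> simp [aRun, h, ih, List.append_assoc]
    · simp only [Bool.not_eq_true] at h
      by_cases hs : c = ' '
      · subst hs; simp [aRun, h, ih]
      · simp [aRun, h, hs, ih, List.append_assoc]

lemma aRun_alpha_prefix (r : List Char) (t : List Char)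
    (h : ∀ c ∈ r, PySem.Chars.isalpha c = true) : aRun (r ++ t) true = aRun t true := by
  induction r with
  | nil => rfl
  | cons c r ih =>
    simp only [List.cons_append, aRun, h c (by simp)]
    exact ih (fun d hd => h d (by simp [hd]))

lemma aRun_nonalpha_prefix (r : List Char) (t : List Char)
    (h : ∀ c ∈ r, PySem.Chars.isalpha c = false) :
    aRun (r ++ t) false = r.filter (fun c => c ≠ ' ') ++ aRun t false := by
  induction r with
  | nil => rfl
  | cons c r ih =>
    have hc : PySem.Chars.isalpha c = false := h c (by simp)
    have ht := ih (fun d hd => h d (by simp [hd]))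
    by_cases hs : c = ' '
    · subst hs; simp [aRun, hc, ht]
    · simp [aRun, hc, hs, ht]

lemma drop_head_not {p : Char → Bool} {l : List Char} :
    ∀ d ∈ (l.dropWhile p).head?, p d = false := by
  induction l with
  | nil => simp
  | cons c t ih =>
    by_cases h : p c = true
    · simpa [List.dropWhile_cons, h] using ih
    · simp only [Bool.not_eq_true] at h
      simp [h]

lemma aRun_true_of_head (t : List Char)
    (h : ∀ d ∈ t.head?, PySem.Chars.isalpha d = false) : aRun t true = aRun t false := by
  cases t with
  | nil => rfl
  | cons c t => simp [aRun, h c (by simp)]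

lemma aRun_eq_groups : ∀ n (l : List Char), l.length ≤ n →
    aRun l false = (pvGroups l).flatMap (fun g =>
      if g.1 then [g.2.headD ' '] else g.2.filter (fun c => c ≠ ' ')) := by
  intro n
  induction n with
  | zero =>
    intro l hl; rw [Nat.le_zero, List.length_eq_zero_iff] at hl; subst hl
    rw [pvGroups]; rfl
  | succ n ih =>
    intro l hl
    cases l with
    | nil => rw [pvGroups]; rfl
    | cons c rest =>
      simp only [List.length_cons, Nat.succ_le_succ_iff] at hl
      by_cases h : PySem.Chars.isalpha c = true
      · have hp : (fun d => PySem.Chars.isalpha d == true) = (fun d => PySem.Chars.isalpha d) := by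
          funext d; simp
        have hsplit := List.takeWhile_append_dropWhile
          (p := fun d => PySem.Chars.isalpha d) (l := rest)
        have hrec := ih (rest.dropWhile (fun d => PySem.Chars.isalpha d))
          (le_trans (List.length_dropWhile_le _ _) hl)
        have htw : ∀ d ∈ rest.takeWhile (fun d => PySem.Chars.isalpha d),
            PySem.Chars.isalpha d = true := fun d hd => List.mem_takeWhile_imp hd
        have hstep : aRun (c :: rest) false
            = c :: aRun (rest.dropWhile (fun d => PySem.Chars.isalpha d)) false := by
          have h1 : aRun rest true
              = aRun (rest.dropWhile (fun d => PySem.Chars.isalpha d)) true := by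
            conv_lhs => rw [← hsplit]
            exact aRun_alpha_prefix _ _ htw
          have h2 := aRun_true_of_head (rest.dropWhile (fun d => PySem.Chars.isalpha d))
            (fun d hd => by
              have := drop_head_not (p := fun d => PySem.Chars.isalpha d) (l := rest) d hd
              simpa using this)
          simp [aRun, h, h1, h2]
        rw [hstep, pvGroups]
        simp only [h, hp, List.flatMap_cons, if_true, List.headD_cons, hrec,
          List.singleton_append]
      · simp only [Bool.not_eq_true] at h
        have hp : (fun d => PySem.Chars.isalpha d == false)
            = (fun d => !PySem.Chars.isalpha d) := by funext d; simp
        have hsplit := List.takeWhile_append_dropWhile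
          (p := fun d => !PySem.Chars.isalpha d) (l := rest)
        have hrec := ih (rest.dropWhile (fun d => !PySem.Chars.isalpha d))
          (le_trans (List.length_dropWhile_le _ _) hl)
        have htw : ∀ d ∈ c :: rest.takeWhile (fun d => !PySem.Chars.isalpha d),
            PySem.Chars.isalpha d = false := by
          intro d hd
          rcases List.mem_cons.mp hd with rfl | hd
          · exact h
          · simpa using List.mem_takeWhile_imp hd
        have hstep : aRun (c :: rest) false
            = (c :: rest.takeWhile (fun d => !PySem.Chars.isalpha d)).filter (fun c => c ≠ ' ')
              ++ aRun (rest.dropWhile (fun d => !PySem.Chars.isalpha d)) false := by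
          conv_lhs => rw [show c :: rest = (c :: rest.takeWhile (fun d => !PySem.Chars.isalpha d))
              ++ rest.dropWhile (fun d => !PySem.Chars.isalpha d) by simp [hsplit]]
          exact aRun_nonalpha_prefix _ _ htw
        rw [hstep, pvGroups]
        simp only [h, hp, List.flatMap_cons, if_false, hrec, Bool.false_eq_true]

-- ===== VERDICT (by name: the statement is the Claim_ definition above) =====
theorem generate_passphrase_spec : Claim_equal_generate_passphrase := by
  intro phrase _
  unfold Spec_generate_passphrase generate_passphrase generate_passphrase_alt
  rw [foldA_eq, List.nil_append, aRun_eq_groups phrase.toList.length _ le_rfl]
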